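-- pv_equiv track=rewrite | github.com/Echo446Ghq/Cracked-Cicada-3301-Third-Puzzle- | b.py | analyze_with_739_pattern
-- ===== SOURCE A (Python) =====
-- def analyze_with_739_pattern(data):
--     analysis = {}
--     pattern = "739"
--
--     occurrences = []
--     start = 0
--     while True:
--         pos = data.find(pattern, start)
--         if pos == -1:
--             break
--         occurrences.append(pos)
--         start = pos + 1
--
--     analysis['739_occurrences'] = occurrences
--
--     if len(occurrences) >= 2:
--         differences = [occurrences[i+1] - occurrences[i] for i in range(len(occurrences)-1)]
--         analysis['739_position_differences'] = differences
--
--     return analysis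
-- ===== SOURCE B (Python) =====
-- def analyze_with_739_pattern(data):
--     # One-pass DFA scan: track match progress toward "739" (no self-overlap),
--     # recording each completed match and its gap to the previous one as we go.
--     occurrences = []
--     differences = []
--     prev = None
--     state = 0
--     for i, ch in enumerate(data):
--         if state == 2 and ch == '9':
--             pos = i - 2
--             occurrences.append(pos)
--             if prev is not None:
--                 differences.append(pos - prev)
--             prev = pos
--             state = 0
--         elif ch == '7':
--             state = 1
--         elif state == 1 and ch == '3':
--             state = 2
--         else:
--             state = 0
--     analysis = {'739_occurrences': occurrences}
--     if differences:
--         analysis['739_position_differences'] = differences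
--     return analysis
-- ===== Notes on version B (the rewrite author's own statement) =====
-- stated objective: alternative
-- what changed: A's repeated str.find cursor loop followed by a separate difference pass is replaced by a single-pass DFA over the characters that tracks match progress toward '739' in a 3-state machine and records each completed match and its gap to the previous match as it goes.
import Mathlib
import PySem

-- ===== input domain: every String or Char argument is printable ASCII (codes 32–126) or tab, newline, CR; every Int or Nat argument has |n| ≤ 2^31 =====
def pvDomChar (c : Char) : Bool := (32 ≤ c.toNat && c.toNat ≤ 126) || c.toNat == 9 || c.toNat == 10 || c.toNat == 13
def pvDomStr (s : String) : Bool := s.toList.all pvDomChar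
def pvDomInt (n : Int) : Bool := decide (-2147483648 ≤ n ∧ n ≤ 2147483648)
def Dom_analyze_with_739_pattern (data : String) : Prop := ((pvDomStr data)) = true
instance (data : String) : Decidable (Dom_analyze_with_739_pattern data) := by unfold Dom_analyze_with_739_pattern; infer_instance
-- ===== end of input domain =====

-- B replaces A's repeated str.find cursor loop plus a separate difference pass by a
-- single-pass 3-state DFA over the characters that records matches and gaps as it goes
-- (objective: alternative).

-- ===== PORT A =====
-- A's `while True: pos = data.find("739", start)` loop; the fuel argument only makes the
-- recursion total (length + 1 steps always suffice, proved below), the computation is A's.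
def pvFindLoop (s pat : List Char) : Int → Nat → List Int
  | _, 0 => []
  | start, fuel + 1 =>
    let pos := PySem.Chars.findFrom s pat start none
    if pos = -1 then [] else pos :: pvFindLoop s pat (pos + 1) fuel

def analyze_with_739_pattern (data : String) : List (String × List Int) :=
  let occurrences := pvFindLoop data.toList "739".toList 0 (data.toList.length + 1)
  let analysis : List (String × List Int) := [("739_occurrences", occurrences)]
  if 2 ≤ occurrences.length then
    analysis ++ [("739_position_differences",
      (List.range (occurrences.length - 1)).map
        (fun (i : Nat) => PySem.List.pyGetD occurrences ((i : Int) + 1) 0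
                  - PySem.List.pyGetD occurrences (i : Int) 0))]
  else analysis

-- ===== PORT B =====
-- B's per-character loop body: state machine step on (state, prev, occurrences, differences).
def pvStep (acc : Nat × Option Int × List Int × List Int) (p : Int × Char) :
    Nat × Option Int × List Int × List Int :=
  let (state, prev, occ, diffs) := acc
  let (i, ch) := p
  if state == 2 && ch == '9' then
    let pos : Int := i - 2
    (0, some pos, occ ++ [pos],
      match prev with
      | none => diffs
      | some q => diffs ++ [pos - q])
  else if ch == '7' then (1, prev, occ, diffs)
  else if state == 1 && ch == '3' then (2, prev, occ, diffs)
  else (0, prev, occ, diffs)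

def analyze_with_739_pattern_alt (data : String) : List (String × List Int) :=
  let r := (PySem.List.enumerate data.toList).foldl pvStep (0, none, [], [])
  let occurrences := r.2.2.1
  let differences := r.2.2.2
  let analysis : List (String × List Int) := [("739_occurrences", occurrences)]
  if differences = [] then analysis
  else analysis ++ [("739_position_differences", differences)]

-- ===== PRECONDITION & SPEC =====
def Spec_analyze_with_739_pattern (data : String) (out : List (String × List Int)) : Prop := out = analyze_with_739_pattern_alt data
instance (data : String) (out : List (String × List Int)) : Decidable (Spec_analyze_with_739_pattern data out) := by unfold Spec_analyze_with_739_pattern; infer_instance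

-- ===== CLAIM (what is proved, stated in full; the proofs are below) =====
def Claim_equal_analyze_with_739_pattern : Prop := ∀ (data : String), Dom_analyze_with_739_pattern data → Spec_analyze_with_739_pattern data (analyze_with_739_pattern data)

-- ===== LEMMAS AND PROOFS =====

-- positions where "739" occurs fully inside the first n characters of s
def pvOccs (s : List Char) (n : Nat) : List Int :=
  ((List.range (n - 2)).filter (fun (p : Nat) => decide ("739".toList <+: s.drop p))).map
    (fun (p : Nat) => (p : Int))

-- the DFA state after reading the first n characters, as a function of the last two
def pvStateAt (s : List Char) (n : Nat) : Nat :=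
  if 2 ≤ n ∧ s[n-2]? = some '7' ∧ s[n-1]? = some '3' then 2
  else if 1 ≤ n ∧ s[n-1]? = some '7' then 1 else 0

-- consecutive differences of a list
def pvZd (l : List Int) : List Int := (l.zip l.tail).map (fun p => p.2 - p.1)

lemma prefix3_iff (s : List Char) (p : Nat) (a b c : Char) :
    ([a, b, c] <+: s.drop p) ↔ (s[p]? = some a ∧ s[p+1]? = some b ∧ s[p+2]? = some c) := by
  have h0 : s[p]? = (s.drop p)[0]? := by simp
  have h1 : s[p+1]? = (s.drop p)[1]? := by rw [List.getElem?_drop]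
  have h2 : s[p+2]? = (s.drop p)[2]? := by rw [List.getElem?_drop]
  rw [h0, h1, h2]
  rcases hd : s.drop p with _ | ⟨x, _ | ⟨y, _ | ⟨z, t⟩⟩⟩ <;>
    simp [List.cons_prefix_iff]

lemma pvZd_length (l : List Int) : (pvZd l).length = l.length - 1 := by
  simp [pvZd, List.length_zip]

lemma pvZd_snoc (l : List Int) (x : Int) :
    pvZd (l ++ [x]) = pvZd l ++ (match l.getLast? with | none => [] | some q => [x - q]) := by
  induction l with
  | nil => simp [pvZd]
  | cons a t ih =>
    cases t with
    | nil => simp [pvZd]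
    | cons b u =>
      have hz : pvZd (a :: b :: (u ++ [x])) = (b - a) :: pvZd (b :: (u ++ [x])) := by
        simp [pvZd]
      have hz2 : pvZd (a :: b :: u) = (b - a) :: pvZd (b :: u) := by simp [pvZd]
      rw [List.cons_append, List.cons_append, hz]
      rw [show (b :: (u ++ [x])) = (b :: u) ++ [x] from rfl, ih, hz2,
          List.getLast?_cons_cons]
      cases (b :: u).getLast? <;> simp

-- The DFA fold over the first n characters computes the state, last occurrence,
-- occurrence list and difference list exactly.
lemma pvFold_invariant (s : List Char) : ∀ n, n ≤ s.length →
    (PySem.List.enumerate (s.take n)).foldl pvStep (0, none, [], [])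
      = (pvStateAt s n, (pvOccs s n).getLast?, pvOccs s n, pvZd (pvOccs s n)) := by
  intro n
  induction n with
  | zero => intro _; simp [pvOccs, pvStateAt, pvZd]
  | succ m ih =>
    intro hle
    have hm : m < s.length := by omega
    have hc : s[m]? = some s[m] := List.getElem?_eq_getElem hm
    have htake : s.take (m + 1) = s.take m ++ [s[m]] := by
      rw [List.take_add_one, hc]; rfl
    have hlen : (s.take m).length = m := List.length_take_of_le (by omega)
    rw [htake, PySem.List.enumerate_append, List.foldl_append, ih (by omega), hlen]
    simp only [PySem.List.enumerate]
    -- one step of the fold on element (m, s[m])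
    have hstep : List.foldl pvStep
        (pvStateAt s m, (pvOccs s m).getLast?, pvOccs s m, pvZd (pvOccs s m))
        [((0 : Int) + (m : Int), s[m])]
        = pvStep (pvStateAt s m, (pvOccs s m).getLast?, pvOccs s m, pvZd (pvOccs s m))
            ((m : Int), s[m]) := by
      simp
    rw [hstep]
    by_cases hmatch : pvStateAt s m = 2 ∧ s[m] = '9'
    · -- a match completes at position m - 2
      obtain ⟨hst, h9⟩ := hmatch
      have hm2 : 2 ≤ m ∧ s[m-2]? = some '7' ∧ s[m-1]? = some '3' := by
        by_contra h
        simp only [pvStateAt, if_neg h] at hst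
        split_ifs at hst <;> omega
      obtain ⟨h2m, h7, h3⟩ := hm2
      have hpre : ("739".toList <+: s.drop (m - 2)) := by
        rw [show ("739".toList = ['7','3','9']) from rfl, prefix3_iff]
        refine ⟨h7, ?_, ?_⟩
        · rw [show m - 2 + 1 = m - 1 by omega]; exact h3
        · rw [show m - 2 + 2 = m by omega, hc, h9]
      have hoccs : pvOccs s (m + 1) = pvOccs s m ++ [((m - 2 : Nat) : Int)] := by
        unfold pvOccs
        rw [show m + 1 - 2 = (m - 2) + 1 by omega, List.range_succ, List.filter_append,
            List.map_append]
        congr 1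
        have hpre' : (['7','3','9'] <+: s.drop (m - 2)) := hpre
        simp [hpre']
      have hnewstate : pvStateAt s (m + 1) = 0 := by
        unfold pvStateAt
        rw [if_neg, if_neg]
        · rintro ⟨-, h⟩
          rw [show m + 1 - 1 = m by omega, hc, h9] at h
          simp at h
        · rintro ⟨-, -, h⟩
          rw [show m + 1 - 1 = m by omega, hc, h9] at h
          simp at h
      have hcast : ((m - 2 : Nat) : Int) = (m : Int) - 2 := by omega
      rw [hoccs, hnewstate, hcast]
      have hcond : (pvStateAt s m == 2 && s[m] == '9') = true := by
        rw [hst, h9]; rfl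
      simp only [pvStep, hcond, if_pos]
      rw [pvZd_snoc, List.getLast?_concat]
      cases (pvOccs s m).getLast? <;> simp
    · -- no match completes at this step
      have hoccs : pvOccs s (m + 1) = pvOccs s m := by
        unfold pvOccs
        by_cases h2m : 2 ≤ m
        · rw [show m + 1 - 2 = (m - 2) + 1 by omega, List.range_succ, List.filter_append,
              List.map_append]
          have : ¬ ("739".toList <+: s.drop (m - 2)) := by
            rw [show ("739".toList = ['7','3','9']) from rfl, prefix3_iff]
            rintro ⟨h7, h3, h9⟩
            rw [show m - 2 + 2 = m by omega, hc] at h9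
            apply hmatch
            refine ⟨?_, by injection h9⟩
            unfold pvStateAt
            rw [if_pos]
            exact ⟨h2m, h7, by rw [show m - 2 + 1 = m - 1 by omega] at h3; exact h3⟩
          have this' : ¬ (['7','3','9'] <+: s.drop (m - 2)) := this
          simp [this']
        · rw [show m + 1 - 2 = m - 2 by omega]
      rw [hoccs]
      -- branch analysis of the step
      by_cases h7 : s[m] = '7'
      · have hns : pvStateAt s (m + 1) = 1 := by
          unfold pvStateAt
          rw [if_neg, if_pos]
          · exact ⟨by omega, by rw [show m + 1 - 1 = m by omega, hc, h7]⟩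
          · rintro ⟨-, -, h⟩
            rw [show m + 1 - 1 = m by omega, hc, h7] at h
            simp at h
        have hb1 : ¬ (pvStateAt s m == 2 && s[m] == '9') = true := by
          simp [h7]
        simp only [pvStep, hb1]
        simp [h7, hns]
      · by_cases h13 : pvStateAt s m = 1 ∧ s[m] = '3'
        · obtain ⟨hst1, h3⟩ := h13
          have hprev7 : 1 ≤ m ∧ s[m-1]? = some '7' := by
            by_contra h
            unfold pvStateAt at hst1
            split_ifs at hst1 <;> omega
          have hns : pvStateAt s (m + 1) = 2 := by
            unfold pvStateAt
            rw [if_pos]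
            exact ⟨by omega, by rw [show m + 1 - 2 = m - 1 by omega]; exact hprev7.2,
                  by rw [show m + 1 - 1 = m by omega, hc, h3]⟩
          simp only [pvStep]
          simp [hst1, h3, hns]
        · have hns : pvStateAt s (m + 1) = 0 := by
            unfold pvStateAt
            rw [if_neg, if_neg]
            · rintro ⟨-, h⟩
              rw [show m + 1 - 1 = m by omega, hc] at h
              exact h7 (by injection h)
            · rintro ⟨hm1, h73, h⟩
              rw [show m + 1 - 1 = m by omega, hc] at h
              have h3 : s[m] = '3' := by injection h
              rw [show m + 1 - 2 = m - 1 by omega] at h73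
              apply h13
              refine ⟨?_, h3⟩
              unfold pvStateAt
              rw [if_neg, if_pos]
              · exact ⟨by omega, h73⟩
              · rintro ⟨hm2, -, hx3⟩
                rw [h73] at hx3
                simp at hx3
          have hb1 : ¬ (pvStateAt s m == 2 && s[m] == '9') = true := by
            intro h
            simp at h
            exact hmatch ⟨h.1, h.2⟩
          have hb3 : ¬ (pvStateAt s m == 1 && s[m] == '3') = true := by
            intro h
            simp at h
            exact h13 ⟨h.1, h.2⟩
          simp only [pvStep, hb1]
          simp [h7, hb3, hns]

-- ===== A-side lemmas (characterising the find loop) =====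

-- extracting the first admissible element of a filtered range
lemma filter_range_first (n p k : Nat) (Q : Nat → Bool) (hp : p < n) (hkp : k ≤ p)
    (hQ : Q p = true) (hmin : ∀ i, k ≤ i → i < p → Q i = false) :
    (List.range n).filter (fun i => k ≤ i && Q i)
      = p :: (List.range n).filter (fun i => p + 1 ≤ i && Q i) := by
  induction n with
  | zero => omega
  | succ m ih =>
    rw [List.range_succ, List.filter_append, List.filter_append]
    by_cases hpm : p < m
    · rw [ih hpm]
      simp only [List.cons_append]
      congr 1
      have h1 : (decide (k ≤ m) && Q m) = (decide (p + 1 ≤ m) && Q m) := by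
        have : decide (k ≤ m) = decide (p + 1 ≤ m) := by
          simp [decide_eq_decide]; omega
        rw [this]
      simp only [List.filter_singleton]
      rw [h1]
    · have hpm' : p = m := by omega
      subst hpm'
      have hnil : (List.range p).filter (fun i => k ≤ i && Q i) = [] := by
        rw [List.filter_eq_nil_iff]
        intro i hi
        rw [List.mem_range] at hi
        by_cases hki : k ≤ i
        · simp [hmin i hki hi]
        · simp [hki]
      have hnil2 : (List.range p).filter (fun i => p + 1 ≤ i && Q i) = [] := by
        rw [List.filter_eq_nil_iff]
        intro i hi
        rw [List.mem_range] at hi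
        have : ¬ (p + 1 ≤ i) := by omega
        simp [this]
      rw [hnil, hnil2]
      simp [hQ, hkp]

-- prefix at i ≥ k makes the pattern an infix of s.drop k
lemma infix_of_prefix_drop (s pat : List Char) (k i : Nat) (hk : k ≤ i)
    (h : pat <+: s.drop i) : pat <:+: s.drop k := by
  have hdd : (s.drop k).drop (i - k) = s.drop i := by
    rw [List.drop_drop]; congr 1; omega
  have h1 : pat <+: (s.drop k).drop (i - k) := hdd ▸ h
  exact h1.isInfix.trans (List.drop_suffix _ _).isInfix

-- A's find loop enumerates, in increasing order, the indices where the pattern occurs.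
lemma pvFindLoop_eq (s pat : List Char) (hp : pat ≠ []) :
    ∀ (fuel k : Nat), k ≤ s.length → s.length + 1 - k ≤ fuel →
      pvFindLoop s pat (k : Int) fuel
        = ((List.range s.length).filter
            (fun (i : Nat) => k ≤ i && decide (pat <+: s.drop i))).map (fun (i : Nat) => (i : Int)) := by
  intro fuel
  induction fuel with
  | zero => intro k hk hf; exact absurd hk (by omega)
  | succ f ih =>
    intro k hk hf
    simp only [pvFindLoop]
    by_cases hpos : PySem.Chars.findFrom s pat (k : Int) none = -1
    · rw [if_pos hpos]
      symm
      rw [List.map_eq_nil_iff, List.filter_eq_nil_iff]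
      intro i hi
      rw [List.mem_range] at hi
      have hno := (PySem.Chars.findFrom_natCast_eq_neg_one_iff s pat k hk).mp hpos
      by_cases hki : k ≤ i
      · have : ¬ pat <+: s.drop i := fun h => hno (infix_of_prefix_drop s pat k i hki h)
        simp [this]
      · simp [hki]
    · obtain ⟨hkle, hpre, hmin⟩ := PySem.Chars.findFrom_natCast_spec s pat k hk hpos
      set pos := PySem.Chars.findFrom s pat (k : Int) none with hposdef
      have hpos0 : 0 ≤ pos := le_trans (by exact_mod_cast Int.natCast_nonneg k) hkle
      have hkp : k ≤ pos.toNat := by omega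
      have hplen : pos.toNat < s.length := by
        have h1 := hpre.length_le
        rw [List.length_drop] at h1
        have h2 : 0 < pat.length := List.length_pos_iff.mpr hp
        omega
      rw [if_neg hpos]
      rw [filter_range_first s.length pos.toNat k
            (fun i => decide (pat <+: s.drop i)) hplen hkp
            (by simp [hpre])
            (fun i h1 h2 => by simp [hmin i h1 h2]),
          List.map_cons]
      congr 1
      · omega
      · have : pos + 1 = ((pos.toNat + 1 : Nat) : Int) := by omega
        rw [this, ih (pos.toNat + 1) (by omega) (by omega)]

-- shifting a cons off the list shifts the (nonnegative) Python index
lemma pyGetD_cons_succ (x : Int) (r : List Int) (j : Int) (hj : 0 ≤ j) :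
    PySem.List.pyGetD (x :: r) (j + 1) 0 = PySem.List.pyGetD r j 0 := by
  have h1 : j = ((j.toNat : Nat) : Int) := by omega
  have h2 : j + 1 = ((j.toNat + 1 : Nat) : Int) := by omega
  rw [h2, PySem.List.pyGetD_natCast, h1, PySem.List.pyGetD_natCast]
  simp [max_eq_left hj]

-- A's range-indexed differences equal the zip-with-tail differences, for every list.
lemma diffs_eq (l : List Int) :
    (List.range (l.length - 1)).map
      (fun (i : Nat) => PySem.List.pyGetD l ((i : Int) + 1) 0 - PySem.List.pyGetD l (i : Int) 0)
      = pvZd l := by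
  induction l with
  | nil => simp [pvZd]
  | cons a rest ih =>
    cases rest with
    | nil => simp [pvZd]
    | cons b t =>
      have hlen : (a :: b :: t).length - 1 = ((b :: t).length - 1) + 1 := by simp
      rw [hlen, List.range_succ_eq_map, List.map_cons, List.map_map]
      have hzd : pvZd (a :: b :: t) = (b - a) :: pvZd (b :: t) := by simp [pvZd]
      rw [hzd]
      congr 1
      · rw [show ((0 : Nat) : Int) + 1 = (0 : Int) + 1 from by norm_num,
            pyGetD_cons_succ a (b :: t) 0 (by omega)]
        simp [PySem.List.pyGetD_zero_cons]
      · calc (List.range ((b :: t).length - 1)).map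
              ((fun (i : Nat) => PySem.List.pyGetD (a :: b :: t) ((i : Int) + 1) 0
                - PySem.List.pyGetD (a :: b :: t) (i : Int) 0) ∘ Nat.succ)
            = (List.range ((b :: t).length - 1)).map
              (fun (i : Nat) => PySem.List.pyGetD (b :: t) ((i : Int) + 1) 0
                - PySem.List.pyGetD (b :: t) (i : Int) 0) := by
              apply List.map_congr_left
              intro i _
              simp only [Function.comp_apply]
              have hcast : ((Nat.succ i : Nat) : Int) = ((i : Nat) : Int) + 1 := by
                push_cast; ring
              rw [hcast,
                  pyGetD_cons_succ a (b :: t) ((i : Int) + 1) (by positivity),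
                  pyGetD_cons_succ a (b :: t) (i : Int) (by positivity)]
          _ = pvZd (b :: t) := ih

-- restricting the occurrence scan from range (length) to range (length - 2) loses nothing
lemma filter_range_shrink (s pat : List Char) (h3 : pat.length = 3) :
    (List.range s.length).filter (fun (i : Nat) => 0 ≤ i && decide (pat <+: s.drop i))
      = (List.range (s.length - 2)).filter (fun (i : Nat) => decide (pat <+: s.drop i)) := by
  conv_lhs => rw [show s.length = (s.length - 2) + (s.length - (s.length - 2)) from by omega]
  rw [List.range_add, List.filter_append]
  have h2 : ((List.range (s.length - (s.length - 2))).map (fun i => s.length - 2 + i)).filter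
      (fun (i : Nat) => 0 ≤ i && decide (pat <+: s.drop i)) = [] := by
    rw [List.filter_eq_nil_iff]
    intro i hi
    rw [List.mem_map] at hi
    obtain ⟨j, _, rfl⟩ := hi
    have hnp : ¬ (pat <+: s.drop (s.length - 2 + j)) := by
      intro h
      have h1 := h.length_le
      rw [List.length_drop] at h1
      omega
    simp [hnp]
  rw [h2, List.append_nil]
  exact List.filter_congr (fun i _ => by simp)

-- ===== VERDICT (by name: the statement is the Claim_ definition above) =====
theorem analyze_with_739_pattern_spec : Claim_equal_analyze_with_739_pattern := by
  intro data _
  unfold Spec_analyze_with_739_pattern analyze_with_739_pattern analyze_with_739_pattern_alt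
  have hA : pvFindLoop data.toList "739".toList 0 (data.toList.length + 1)
      = pvOccs data.toList data.toList.length := by
    rw [show (0 : Int) = ((0 : Nat) : Int) from rfl,
        pvFindLoop_eq data.toList "739".toList (by decide) (data.toList.length + 1) 0
          (by omega) (by omega)]
    unfold pvOccs
    rw [filter_range_shrink data.toList "739".toList (by decide)]
  have hB := pvFold_invariant data.toList data.toList.length (le_refl _)
  rw [List.take_length] at hB
  rw [hA, hB]
  simp only []
  set O := pvOccs data.toList data.toList.length with hO
  have hlen := pvZd_length O
  by_cases h2 : 2 ≤ O.length
  · rw [if_pos h2, if_neg (fun h => by rw [h] at hlen; simp at hlen; omega)]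
    rw [diffs_eq]
  · rw [if_neg h2, if_pos (List.length_eq_zero_iff.mp (by omega))]
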